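-- pv_equiv track=rewrite | github.com/salimdason/kaggle_redefining_cancer_treatment | src/preprocess_data.py | split_mutation
-- ===== SOURCE A (Python) =====
-- def split_mutation(word):
--     """
--     Splits a mutation in symbols. It first split the word with some keywords (del, ins, dup, ...)
--     and them splits all the rest of letters. Per every element generated a symbol is created adding
--     the symbol > before the letter or string.
--     :param str word: the mutation to split
--     :return List[str]: a list of symbols
--     """
--     word = word.strip()
--     for symbol in ['del', 'ins', 'dup', 'trunc', 'splice', 'fs', 'null', 'Fusion', '#', '+']:
--         word = word.replace(symbol, ' >{} '.format(symbol))
--     i = 0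
--     new_words = []
--     while i < len(word):
--         if word[i] == '>':
--             j = i + 1
--             while j < len(word) and word[j] != ' ':
--                 j += 1
--             new_words.append('{}'.format(word[i:j]))
--             i = j
--         elif word[i] != ' ':
--             new_words.append('>{}'.format(word[i]))
--             i += 1
--         else:
--             i += 1
--     return new_words
-- ===== SOURCE B (Python) =====
-- def split_mutation(word):
--     """Tokenize-then-map re-implementation: same keyword replacement, then split
--     on ' ' and map each token via str.partition('>') instead of A's index-based
--     char-by-char state machine."""
--     word = word.strip()
--     for symbol in ['del', 'ins', 'dup', 'trunc', 'splice', 'fs', 'null', 'Fusion', '#', '+']: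
--         word = word.replace(symbol, ' >{} '.format(symbol))
--     new_words = []
--     for token in word.split(' '):
--         pre, sep, post = token.partition('>')
--         for c in pre:
--             new_words.append('>' + c)
--         if sep:
--             new_words.append(sep + post)
--     return new_words
-- ===== Notes on version B (the rewrite author's own statement) =====
-- stated objective: faster
-- what changed: Replaces A's index-based char-by-char state machine (inner while scanning to the next space) by a tokenize-then-map decomposition: split on ' ' with str.split, then handle each token with str.partition('>').
import Mathlib
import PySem

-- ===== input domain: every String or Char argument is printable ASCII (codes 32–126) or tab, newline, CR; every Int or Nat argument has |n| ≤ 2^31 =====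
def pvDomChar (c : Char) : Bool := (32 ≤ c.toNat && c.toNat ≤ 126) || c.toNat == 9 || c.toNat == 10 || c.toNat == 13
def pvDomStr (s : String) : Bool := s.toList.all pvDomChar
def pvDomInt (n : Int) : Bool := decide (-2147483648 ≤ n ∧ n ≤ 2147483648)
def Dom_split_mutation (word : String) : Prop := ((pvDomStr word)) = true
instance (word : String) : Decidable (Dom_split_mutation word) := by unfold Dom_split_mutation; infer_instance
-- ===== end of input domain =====

-- B replaces A's index-based char scanner by a split-on-space + partition('>') tokenizer (measured faster by a constant factor; C-level split/partition instead of a per-char interpreter loop).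

-- ===== PORT A =====
-- A's while loop over indices: on '>' the inner while 'j < len(word) and word[j] != " "'
-- is the takeWhile/dropWhile pair; branch order is A's (first '>', then non-space, else skip).
def splitLoopA : List Char → List String
  | [] => []
  | c :: rest =>
    if c = '>' then
      String.ofList (c :: rest.takeWhile (· ≠ ' ')) :: splitLoopA (rest.dropWhile (· ≠ ' '))
    else if c ≠ ' ' then
      String.ofList ['>', c] :: splitLoopA rest
    else
      splitLoopA rest
  termination_by l => l.length
  decreasing_by
  · simp only [List.length_cons]
    exact Nat.lt_succ_of_le (List.length_dropWhile_le _ rest)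
  · simp
  · simp

def split_mutation (word : String) : List String :=
  let w := (["del", "ins", "dup", "trunc", "splice", "fs", "null", "Fusion", "#", "+"]).foldl
      (fun w s => PySem.Str.replace w s (" >" ++ s ++ " ")) (PySem.Str.strip word)
  splitLoopA w.toList

-- ===== PORT B =====
def split_mutation_alt (word : String) : List String :=
  let w := (["del", "ins", "dup", "trunc", "splice", "fs", "null", "Fusion", "#", "+"]).foldl
      (fun w s => PySem.Str.replace w s (" >" ++ s ++ " ")) (PySem.Str.strip word)
  (PySem.Chars.splitOn w.toList [' ']).foldl (fun acc t =>
    -- pre, sep, post = token.partition('>'); sep ++ post = suffix from the first '>'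
    let pre := t.takeWhile (· ≠ '>')
    let rest := t.dropWhile (· ≠ '>')
    (acc ++ pre.map (fun c => String.ofList ['>', c])) ++
      (if rest = [] then [] else [String.ofList rest])) []

-- ===== PRECONDITION & SPEC =====
def Spec_split_mutation (word : String) (out : List String) : Prop := out = split_mutation_alt word
instance (word : String) (out : List String) : Decidable (Spec_split_mutation word out) := by unfold Spec_split_mutation; infer_instance

-- ===== CLAIM (what is proved, stated in full; the proofs are below) =====
def Claim_equal_split_mutation : Prop := ∀ (word : String), Dom_split_mutation word → Spec_split_mutation word (split_mutation word)

-- ===== LEMMAS AND PROOFS =====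

-- simple structural model of str.split(' ')
def spSp : List Char → List (List Char)
  | [] => [[]]
  | c :: rest => if c = ' ' then [] :: spSp rest else (spSp rest).modifyHead (c :: ·)

-- B's per-token processing (partition-based)
def procTok (t : List Char) : List String :=
  (t.takeWhile (· ≠ '>')).map (fun c => String.ofList ['>', c]) ++
    (if t.dropWhile (· ≠ '>') = [] then [] else [String.ofList (t.dropWhile (· ≠ '>'))])

theorem spSp_ne_nil (cs : List Char) : spSp cs ≠ [] := by
  cases cs with
  | nil => simp [spSp]
  | cons c rest =>
    simp only [spSp]
    split
    · simp
    · cases h : spSp rest with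
      | nil => exact absurd h (spSp_ne_nil rest)
      | cons t ts => simp [h]

theorem splitOn_go_space (l : List Char) : ∀ (fuel : Nat) (cur : List Char)
    (acc : List (List Char)), l.length ≤ fuel →
    PySem.Chars.splitOn.go [' '] fuel l cur acc =
      acc.reverse ++ (spSp l).modifyHead (cur.reverse ++ ·) := by
  induction l with
  | nil =>
    intro fuel cur acc _
    cases fuel <;> simp [PySem.Chars.splitOn.go, spSp]
  | cons c rest ih =>
    intro fuel cur acc hf
    cases fuel with
    | zero => simp at hf
    | succ f =>
      simp only [PySem.Chars.splitOn.go]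
      by_cases hc : c = ' '
      · subst hc
        rw [if_pos (by simp [List.isPrefixOf])]
        have hd : List.drop [' '].length (' ' :: rest) = rest := by simp
        rw [hd, ih f [] (cur.reverse :: acc) (by simpa using Nat.le_of_succ_le_succ hf)]
        cases h : spSp rest <;> simp [spSp, h]
      · have hnp : ¬ ([' '].isPrefixOf (c :: rest) = true) := by
          simp [List.isPrefixOf]
          exact fun h => hc h.symm
        rw [if_neg hnp, ih f (c :: cur) acc (by simpa using Nat.le_of_succ_le_succ hf)]
        simp only [spSp, if_neg hc, List.reverse_cons]
        rw [List.modifyHead_modifyHead]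
        congr 2
        funext t
        simp [Function.comp]

theorem splitOn_space (cs : List Char) :
    PySem.Chars.splitOn cs [' '] = spSp cs := by
  show PySem.Chars.splitOn.go [' '] (cs.length + 1) cs [] [] = spSp cs
  rw [splitOn_go_space cs (cs.length + 1) [] [] (Nat.le_succ _)]
  cases h : spSp cs with
  | nil => exact absurd h (spSp_ne_nil cs)
  | cons t ts => simp

theorem spSp_take_drop (cs : List Char) :
    spSp cs = cs.takeWhile (· ≠ ' ') ::
      (match cs.dropWhile (· ≠ ' ') with | [] => [] | _ :: r => spSp r) := by
  induction cs with
  | nil => simp [spSp]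
  | cons c rest ih =>
    by_cases hc : c = ' '
    · subst hc
      simp [spSp, List.takeWhile_cons, List.dropWhile_cons]
    · simp only [spSp, if_neg hc, ih, List.takeWhile_cons, List.dropWhile_cons]
      simp [hc]

theorem dropWhile_head_space : ∀ {rest : List Char} {d : Char} {r : List Char},
    rest.dropWhile (· ≠ ' ') = d :: r → d = ' ' := by
  intro rest
  induction rest with
  | nil => intro d r h; simp at h
  | cons c cs ih =>
    intro d r h
    by_cases hc : c = ' '
    · subst hc
      simp [List.dropWhile_cons] at h
      exact h.1.symm
    · rw [List.dropWhile_cons, if_pos (by simpa using hc)] at h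
      exact ih h

theorem flatMap_aux : ∀ (n : Nat) (cs : List Char), cs.length ≤ n →
    (spSp cs).flatMap procTok = splitLoopA cs := by
  intro n
  induction n with
  | zero =>
    intro cs h
    have : cs = [] := List.eq_nil_of_length_eq_zero (Nat.le_zero.mp h)
    subst this
    simp [spSp, procTok, splitLoopA]
  | succ n ih =>
    intro cs h
    cases cs with
    | nil => simp [spSp, procTok, splitLoopA]
    | cons c rest =>
      have hrest : rest.length ≤ n := Nat.le_of_succ_le_succ h
      by_cases hc : c = '>'
      · subst hc
        rw [spSp_take_drop]
        have h1 : List.takeWhile (· ≠ ' ') ('>' :: rest) = '>' :: rest.takeWhile (· ≠ ' ') := by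
          simp [List.takeWhile_cons]
        have h2 : List.dropWhile (· ≠ ' ') ('>' :: rest) = rest.dropWhile (· ≠ ' ') := by
          simp [List.dropWhile_cons]
        have hpt : procTok ('>' :: rest.takeWhile (· ≠ ' ')) =
            [String.ofList ('>' :: rest.takeWhile (· ≠ ' '))] := by
          simp [procTok]
        have hA : splitLoopA ('>' :: rest) =
            String.ofList ('>' :: rest.takeWhile (· ≠ ' ')) ::
              splitLoopA (rest.dropWhile (· ≠ ' ')) := by
          rw [splitLoopA]
          simp
        rw [h1, h2, List.flatMap_cons, hpt, hA]
        simp only [List.singleton_append]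
        congr 1
        cases hdw : rest.dropWhile (· ≠ ' ') with
        | nil => simp [splitLoopA]
        | cons d r =>
          have hd : d = ' ' := dropWhile_head_space hdw
          subst hd
          have hr : r.length ≤ n := by
            have h3 : (rest.dropWhile (· ≠ ' ')).length ≤ rest.length :=
              List.length_dropWhile_le _ rest
            rw [hdw] at h3
            simp at h3
            omega
          have hB : splitLoopA (' ' :: r) = splitLoopA r := by
            rw [splitLoopA]
            simp
          rw [ih r hr, hB]
      · by_cases hs : c = ' '
        · subst hs
          have h0 : spSp (' ' :: rest) = [] :: spSp rest := by simp [spSp]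
          have hpt : procTok [] = [] := by simp [procTok]
          have hA : splitLoopA (' ' :: rest) = splitLoopA rest := by
            rw [splitLoopA]
            simp
          rw [h0, List.flatMap_cons, hpt, List.nil_append, hA]
          exact ih rest hrest
        · have h0 : spSp (c :: rest) = (spSp rest).modifyHead (c :: ·) := by
            simp [spSp, hs]
          cases hsp : spSp rest with
          | nil => exact absurd hsp (spSp_ne_nil rest)
          | cons t ts =>
            have hpt : procTok (c :: t) = String.ofList ['>', c] :: procTok t := by
              simp [procTok, List.takeWhile_cons, List.dropWhile_cons, hc]
            have hA : splitLoopA (c :: rest) = String.ofList ['>', c] :: splitLoopA rest := by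
              rw [splitLoopA]
              simp [hc, hs]
            rw [h0, hsp, List.modifyHead_cons, List.flatMap_cons, hpt, hA]
            rw [← ih rest hrest, hsp]
            simp

theorem flatMap_spSp_eq_loopA (cs : List Char) :
    (spSp cs).flatMap procTok = splitLoopA cs :=
  flatMap_aux cs.length cs le_rfl

theorem foldl_procTok (ts : List (List Char)) : ∀ (acc : List String),
    ts.foldl (fun acc t =>
      (acc ++ (t.takeWhile (· ≠ '>')).map (fun c => String.ofList ['>', c])) ++
        (if t.dropWhile (· ≠ '>') = [] then [] else [String.ofList (t.dropWhile (· ≠ '>'))])) acc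
      = acc ++ ts.flatMap procTok := by
  induction ts with
  | nil => intro acc; simp
  | cons t ts ih =>
    intro acc
    rw [List.foldl_cons, ih, List.flatMap_cons]
    simp [procTok]

-- ===== VERDICT (by name: the statement is the Claim_ definition above) =====
theorem split_mutation_spec : Claim_equal_split_mutation := by
  intro word _
  unfold Spec_split_mutation split_mutation split_mutation_alt
  simp only []
  generalize (List.foldl (fun w s => PySem.Str.replace w s (" >" ++ s ++ " ")) (PySem.Str.strip word)
        ["del", "ins", "dup", "trunc", "splice", "fs", "null", "Fusion", "#", "+"]) = w
  rw [splitOn_space, foldl_procTok, List.nil_append, flatMap_spSp_eq_loopA]
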